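-- pv_equiv track=rewrite | github.com/ereynier/technical-tests | sudoku/sudoku.py | gridNorm
-- ===== SOURCE A (Python) =====
-- def gridNorm(grid):
--     if len(grid) != 9:
--         print ("Error")
--         return (False)
--     for i in range(9):
--         if len(grid[i]) != 9:
--             print ("Error")
--             return (False)
--         for j in range(9):
--             if grid[i][j] != "." and (ord(grid[i][j]) < 49 or ord(grid[i][j]) > 57):
--                 print ("Error")
--                 return (False)
--     return (True)
-- ===== SOURCE B (Python) =====
-- def _match(s, n):
--     """Hand-rolled anchored matcher for the pattern [1-9.]{n}: consume one
--     class character per recursive step, then require the end of the string."""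
--     if n == 0:
--         return s == ""
--     return s != "" and (s[0] == "." or "1" <= s[0] <= "9") and _match(s[1:], n - 1)
--
--
-- def gridNorm(grid):
--     if len(grid) == 9 and all(_match("".join(row), 9) for row in grid):
--         return True
--     print("Error")
--     return False
-- ===== Notes on version B (the rewrite author's own statement) =====
-- stated objective: alternative
-- what changed: Each row is first flattened with ''.join and then validated by a hand-rolled anchored pattern matcher for [1-9.]{9} (recursive: consume one class character per step, then require end-of-string), replacing A's index-driven double loop with per-cell ord-range comparisons and three early-return sites.
import Mathlib
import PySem

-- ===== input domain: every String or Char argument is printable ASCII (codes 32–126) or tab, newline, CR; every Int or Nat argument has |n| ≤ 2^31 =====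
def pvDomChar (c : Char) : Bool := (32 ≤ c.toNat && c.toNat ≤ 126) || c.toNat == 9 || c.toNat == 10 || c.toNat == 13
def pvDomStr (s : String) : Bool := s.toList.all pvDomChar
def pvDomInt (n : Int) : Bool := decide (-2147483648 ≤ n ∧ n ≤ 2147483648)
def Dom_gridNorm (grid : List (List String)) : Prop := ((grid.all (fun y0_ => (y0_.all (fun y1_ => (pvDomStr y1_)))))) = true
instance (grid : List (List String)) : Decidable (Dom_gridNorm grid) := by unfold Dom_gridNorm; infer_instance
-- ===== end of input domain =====

-- B flattens each row with ''.join and runs a recursive anchored matcher for the pattern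
-- [1-9.]{9} over the joined string, instead of A's index-driven double loop with ord-range
-- comparisons (alternative decomposition, same cost). Both programs print "Error" once on a
-- failing grid; the equivalence proved is about the return value only.

-- ===== PORT A =====
-- ord(s) for a 1-character string; exact on cells reached under Pre_gridNorm (all of length 1)
def pvOrd (s : String) : Nat := (s.toList.headD (Char.ofNat 0)).toNat

def pvCellA (c : String) : Bool :=
  !(c != "." && (decide (pvOrd c < 49) || decide (57 < pvOrd c)))

def pvRowA (row : List String) : Bool :=
  if row.length ≠ 9 then false
  else (List.range 9).all (fun j => pvCellA ((PySem.List.pyGet? row (j : Int)).getD ""))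

def gridNorm (grid : List (List String)) : Bool :=
  if grid.length ≠ 9 then false
  else (List.range 9).all (fun i => pvRowA ((PySem.List.pyGet? grid (i : Int)).getD []))

-- ===== PORT B =====
-- _match(s, n): anchored matcher for [1-9.]{n}, one class character consumed per recursive step
def pvMatch : List Char → Nat → Bool
  | s, 0 => decide (s = [])
  | [], _ + 1 => false
  | c :: t, n + 1 => (c == '.' || (decide ('1' ≤ c) && decide (c ≤ '9'))) && pvMatch t n

def gridNorm_alt (grid : List (List String)) : Bool :=
  decide (grid.length = 9) &&
    grid.all (fun row => pvMatch (row.flatMap String.toList) 9)   -- "".join(row)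

-- ===== PRECONDITION & SPEC =====
-- Pre_ excludes grids of length 9 containing a cell that is not a single character: on such a
-- cell, when reached, Python's ord() raises TypeError, and when it is not reached A's per-cell
-- row-length check and B's joined-string match count different things, so neither value is
-- the specified one — the exclusion is by cell shape, not reachability.
def Pre_gridNorm (grid : List (List String)) : Prop :=
  grid.length = 9 → ∀ row ∈ grid, ∀ c ∈ row, c.length = 1
instance (grid : List (List String)) : Decidable (Pre_gridNorm grid) := by
  unfold Pre_gridNorm; infer_instance

def pvWitness_gridNorm : List (List String) :=
  List.replicate 9 (List.replicate 9 ".")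

def Spec_gridNorm (grid : List (List String)) (out : Bool) : Prop := out = gridNorm_alt grid
instance (grid : List (List String)) (out : Bool) : Decidable (Spec_gridNorm grid out) := by unfold Spec_gridNorm; infer_instance

-- ===== CLAIM (what is proved, stated in full; the proofs are below) =====
def Claim_equal_gridNorm : Prop := ∀ (grid : List (List String)), Dom_gridNorm grid → Pre_gridNorm grid → Spec_gridNorm grid (gridNorm grid)

-- ===== LEMMAS AND PROOFS =====

-- the character class of B's matcher
def pvClass (c : Char) : Bool := c == '.' || (decide ('1' ≤ c) && decide (c ≤ '9'))

theorem all_mem_congr {α : Type} (l : List α) (f g : α → Bool)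
    (h : ∀ x ∈ l, f x = g x) : l.all f = l.all g := by
  induction l with
  | nil => rfl
  | cons x xs ih => simp_all

-- indexed iteration over range(len(l)) = iteration over l itself
theorem all_range_pyGet {α : Type} (l : List α) (d : α) (f : α → Bool) :
    ((List.range l.length).all (fun i => f ((PySem.List.pyGet? l (i : Int)).getD d)))
      = l.all f := by
  rw [Bool.eq_iff_iff]
  simp only [List.all_eq_true, List.mem_range, PySem.List.pyGet?_natCast]
  constructor
  · intro h x hx
    obtain ⟨i, hi, rfl⟩ := List.mem_iff_getElem.mp hx
    simpa [List.getElem?_eq_getElem hi] using h i hi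
  · intro h i hi
    simpa [List.getElem?_eq_getElem hi] using h _ (List.getElem_mem hi)

-- the matcher characterised: exactly n characters, all in the class
theorem pvMatch_eq (n : Nat) (s : List Char) :
    pvMatch s n = (decide (s.length = n) && s.all pvClass) := by
  induction n generalizing s with
  | zero => cases s <;> simp [pvMatch]
  | succ n ih =>
    cases s with
    | nil => simp [pvMatch]
    | cons c t =>
      rw [show pvMatch (c :: t) (n + 1) = (pvClass c && pvMatch t n) from rfl, ih]
      rw [Bool.eq_iff_iff]
      simp only [Bool.and_eq_true, decide_eq_true_eq, List.length_cons, List.all_cons,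
        Nat.add_right_cancel_iff]
      tauto

-- length of the joined row when every cell is a single character
theorem flat_len (row : List String) (h : ∀ c ∈ row, c.length = 1) :
    (row.flatMap String.toList).length = row.length := by
  induction row with
  | nil => rfl
  | cons c t ih =>
    simp only [List.flatMap_cons, List.length_append, List.length_cons,
      String.length_toList, h c (by simp)]
    rw [ih (fun x hx => h x (by simp [hx]))]; omega

-- per-cell agreement on single-character cells
theorem cell_eq (c : String) (hc : c.length = 1) :
    pvCellA c = (c.toList.all pvClass) := by
  obtain ⟨ch, hch⟩ : ∃ ch, c.toList = [ch] :=
    List.length_eq_one_iff.mp (by rw [String.length_toList]; exact hc)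
  have hc' : c = String.ofList [ch] := String.toList_inj.mp (by simp [hch])
  subst hc'
  rw [Bool.eq_iff_iff]
  have hdot : (String.ofList [ch] = ".") ↔ ch = '.' := by
    constructor
    · intro h; have := congrArg String.toList h; simpa using this
    · rintro rfl; rfl
  simp only [pvCellA, pvOrd, hch, List.headD, pvClass, List.all_cons, List.all_nil,
    Bool.and_true, Bool.not_eq_eq_eq_not, Bool.not_true, Bool.and_eq_false_iff,
    bne_eq_false_iff_eq, Bool.or_eq_false_iff, decide_eq_false_iff_not, Nat.not_lt,
    Bool.or_eq_true, beq_iff_eq, Bool.and_eq_true, decide_eq_true_eq,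
    Char.le_def, UInt32.le_iff_toNat_le, hdot]
  constructor
  · rintro (h | ⟨h1, h2⟩)
    · exact Or.inl h
    · exact Or.inr ⟨h1, h2⟩
  · rintro (h | ⟨h1, h2⟩)
    · exact Or.inl h
    · exact Or.inr ⟨h1, h2⟩

-- row agreement: A's row check = B's join-and-match of the row
theorem row_eq (row : List String) (hrow : ∀ c ∈ row, c.length = 1) :
    pvRowA row = pvMatch (row.flatMap String.toList) 9 := by
  rw [pvMatch_eq, flat_len row hrow, List.all_flatMap]
  unfold pvRowA
  by_cases h9 : row.length = 9
  · rw [if_neg (by omega), show (9 : Nat) = row.length from h9.symm,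
      all_range_pyGet row "" pvCellA]
    simp only [h9, decide_true, Bool.true_and]
    exact all_mem_congr _ _ _ (fun c hc => cell_eq c (hrow c hc))
  · simp [h9]

-- ===== VERDICT (by name: the statement is the Claim_ definition above) =====
theorem gridNorm_spec : Claim_equal_gridNorm := by
  intro grid _ hpre
  unfold Spec_gridNorm gridNorm gridNorm_alt
  by_cases h9 : grid.length = 9
  · rw [if_neg (by omega), show (9 : Nat) = grid.length from h9.symm,
      all_range_pyGet grid [] pvRowA]
    simp only [h9, decide_true, Bool.true_and]
    exact all_mem_congr _ _ _ (fun row hrow => row_eq row (fun c hc => hpre h9 row hrow c hc))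
  · simp [h9]
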